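-- pv_equiv track=rewrite | github.com/Cycrypto/BOJ | 백준/Silver/1316. 그룹 단어 체커/그룹 단어 체커.py | solve
-- ===== SOURCE A (Python) =====
-- def solve(check):
--     s = set()
--     k = check[0]
--
--     s.add(k)
--
--     for i in range(1, len(check)):
--         if check[i] not in s:
--             k = check[i]
--             s.add(k)
--
--         elif check[i] != k:
--             return False
--     return True
-- ===== SOURCE B (Python) =====
-- def solve(check):
--     # Collapse runs of consecutive equal characters, then test distinctness.
--     groups = []
--     for c in check:
--         if not groups or groups[-1] != c:
--             groups.append(c)
--     return len(groups) == len(set(groups))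
-- ===== Notes on version B (the rewrite author's own statement) =====
-- stated objective: idiomatic
-- what changed: B first collapses runs of consecutive equal characters into a list of run representatives and then tests that list for distinctness via len(set(...)), instead of A's single interleaved pass tracking a seen-set and the current run character with an early return; Pre_ excludes the empty string, on which A raises IndexError (check[0]) while B naturally returns True.
-- outside the precondition, e.g. on solve(''): A raises IndexError, B returns True
import Mathlib
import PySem

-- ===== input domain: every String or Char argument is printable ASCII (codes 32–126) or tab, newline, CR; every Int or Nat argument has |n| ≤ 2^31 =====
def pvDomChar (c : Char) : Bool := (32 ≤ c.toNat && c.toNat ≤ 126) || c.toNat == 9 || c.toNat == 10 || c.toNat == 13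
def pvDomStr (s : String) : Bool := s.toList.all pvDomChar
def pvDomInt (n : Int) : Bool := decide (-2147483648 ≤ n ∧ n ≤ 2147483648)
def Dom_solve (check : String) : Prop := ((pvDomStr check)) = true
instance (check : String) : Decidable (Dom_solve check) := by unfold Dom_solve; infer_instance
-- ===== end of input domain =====

-- B collapses runs of equal characters into a list of representatives and then tests that
-- list for distinctness, instead of A's interleaved seen-set/current-char pass (idiomatic).

-- ===== PORT A =====
-- the for-loop over range(1, len(check)) with early return, state (s, k)
def solveLoop (rest : List Char) (s : PySem.Set Char) (k : Char) : Bool :=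
  match rest with
  | [] => true
  | c :: t =>
    if ¬ (PySem.Set.contains s c) then solveLoop t (PySem.Set.add s c) c
    else if c ≠ k then false
    else solveLoop t s k

def solve (check : String) : Bool :=
  match PySem.Str.pyGet? check 0 with
  | none => false   -- check[0] raises IndexError in Python; excluded by Pre_solve
  | some k => solveLoop check.toList.tail (PySem.Set.add PySem.Set.empty k) k

-- ===== PORT B =====
def solve_alt (check : String) : Bool :=
  let groups := check.toList.foldl
    (fun g c => if g = [] ∨ g.getLast? ≠ some c then g ++ [c] else g) []
  groups.length == (PySem.Set.ofList groups).length

-- ===== PRECONDITION & SPEC =====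
-- Pre_ excludes exactly the empty string, on which A raises IndexError at check[0].
def Pre_solve (check : String) : Prop := check ≠ ""
instance (check : String) : Decidable (Pre_solve check) := by unfold Pre_solve; infer_instance
def pvWitness_solve : String := "aabba"

def Spec_solve (check : String) (out : Bool) : Prop := out = solve_alt check
instance (check : String) (out : Bool) : Decidable (Spec_solve check out) := by unfold Spec_solve; infer_instance

-- ===== CLAIM (what is proved, stated in full; the proofs are below) =====
def Claim_equal_solve : Prop := ∀ (check : String), Dom_solve check → Pre_solve check → Spec_solve check (solve check)

-- ===== LEMMAS AND PROOFS =====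

-- run-collapse relative to the current run character k (drops the leading run of k's)
def col (k : Char) : List Char → List Char
  | [] => []
  | c :: t => if c = k then col k t else c :: col c t

theorem solveLoop_eq (rest : List Char) (s : PySem.Set Char) (k : Char)
    (hks : k ∈ s) :
    solveLoop rest s k
      = decide ((col k rest).Nodup ∧ ∀ c ∈ col k rest, c ∉ s) := by
  induction rest generalizing s k with
  | nil => simp [solveLoop, col]
  | cons c t ih =>
    by_cases hm : c ∈ s
    · have hmt : PySem.Set.contains s c = true := by simp [PySem.Set.contains, hm]
      by_cases hk : c = k
      · subst hk
        have hcol : col c (c :: t) = col c t := by simp [col]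
        simp only [solveLoop]
        rw [if_neg (by simp [hm]), if_neg (by simp), hcol]
        exact ih s c hks
      · have hfalse : solveLoop (c :: t) s k = false := by
          simp only [solveLoop]
          rw [if_neg (by simp [hm]), if_pos hk]
        rw [hfalse]; symm
        simp only [decide_eq_false_iff_not, not_and]
        intro _ hall
        exact (hall c (by simp [col, hk])) hm
    · have hmf : PySem.Set.contains s c = false := by simp [PySem.Set.contains, hm]
      have hk : c ≠ k := fun h => hm (h ▸ hks)
      have hadd : PySem.Set.add s c = s ++ [c] := by simp [PySem.Set.add, PySem.Set.contains, hm]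
      simp only [solveLoop]
      rw [if_pos (by simp [hm]), hadd, ih (s ++ [c]) c (by simp)]
      have hcol : col k (c :: t) = c :: col c t := by simp [col, hk]
      rw [hcol]
      simp only [List.nodup_cons, List.mem_cons, List.mem_append,
        List.not_mem_nil, or_false, decide_eq_decide]
      constructor
      · rintro ⟨hnd, hall⟩
        refine ⟨⟨fun hc => (hall c hc) (Or.inr rfl), hnd⟩, ?_⟩
        rintro x (rfl | hx)
        · exact hm
        · exact fun hs => (hall x hx) (Or.inl hs)
      · rintro ⟨⟨hcn, hnd⟩, hall⟩
        refine ⟨hnd, fun x hx => ?_⟩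
        rintro (hs | rfl)
        · exact (hall x (Or.inr hx)) hs
        · exact hcn hx

-- B\'s foldl builds g ++ col k t once the accumulator is nonempty with last element k
theorem foldl_col (t : List Char) (g : List Char) (k : Char)
    (hne : g ≠ []) (hlast : g.getLast? = some k) :
    t.foldl (fun g c => if g = [] ∨ g.getLast? ≠ some c then g ++ [c] else g) g
      = g ++ col k t := by
  induction t generalizing g k with
  | nil => simp [col]
  | cons c t ih =>
    rw [List.foldl_cons]
    by_cases hk : c = k
    · subst hk
      have hcond : ¬ (g = [] ∨ g.getLast? ≠ some c) := by
        rw [hlast]; simp [hne]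
      have hcol : col c (c :: t) = col c t := by simp [col]
      rw [if_neg hcond, hcol]
      exact ih g c hne hlast
    · have hcond : g = [] ∨ g.getLast? ≠ some c := by
        rw [hlast]; exact Or.inr (by simp; exact fun h => hk h.symm)
      have hcol : col k (c :: t) = c :: col c t := by simp [col, hk]
      rw [if_pos hcond, hcol, ih (g ++ [c]) c (by simp) (by simp)]
      simp

theorem foldl_col0 (k : Char) (t : List Char) :
    (k :: t).foldl (fun g c => if g = [] ∨ g.getLast? ≠ some c then g ++ [c] else g) []
      = k :: col k t := by
  rw [List.foldl_cons]
  have h1 : (if ([] : List Char) = [] ∨ ([] : List Char).getLast? ≠ some k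
      then ([] : List Char) ++ [k] else ([] : List Char)) = [k] := by simp
  rw [h1]
  simpa using foldl_col t [k] k (by simp) (by simp)

-- B\'s distinctness test: the length comparison with the dedup decides Nodup
theorem ofList_of_nodup (L : List Char) (h : L.Nodup) : PySem.Set.ofList L = L := by
  induction L with
  | nil => simp [PySem.Set.ofList_eq_foldl]
  | cons x xs ih =>
    rcases List.nodup_cons.mp h with ⟨hx, hnd⟩
    rw [PySem.Set.ofList_cons, ih hnd]
    simp only [PySem.Set.discard]
    rw [List.filter_eq_self.mpr]
    intro a ha
    have : a ≠ x := fun h' => hx (h' ▸ ha)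
    simp [this]

theorem length_ofList_lt (L : List Char) (h : ¬ L.Nodup) :
    (PySem.Set.ofList L).length < L.length := by
  induction L with
  | nil => simp at h
  | cons x xs ih =>
    rw [PySem.Set.ofList_cons]
    by_cases hx : x ∈ xs
    · have hx' : x ∈ PySem.Set.ofList xs := (PySem.Set.mem_ofList xs x).mpr hx
      have hlt : ((PySem.Set.ofList xs).discard x).length < (PySem.Set.ofList xs).length := by
        simp only [PySem.Set.discard]
        exact List.length_filter_lt_length_iff_exists.mpr ⟨x, hx', by simp⟩
      have := PySem.Set.length_ofList_le xs
      simp only [List.length_cons]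
      omega
    · have hnd : ¬ xs.Nodup := fun hh => h (List.nodup_cons.mpr ⟨hx, hh⟩)
      have hlt := ih hnd
      have : ((PySem.Set.ofList xs).discard x).length ≤ (PySem.Set.ofList xs).length := by
        simp only [PySem.Set.discard]; exact List.length_filter_le _ _
      simp only [List.length_cons]
      omega

theorem beq_length_ofList (L : List Char) :
    (L.length == (PySem.Set.ofList L).length) = decide L.Nodup := by
  by_cases h : L.Nodup
  · simp [ofList_of_nodup L h, h]
  · have := length_ofList_lt L h
    simp [h]
    omega

-- ===== VERDICT (by name: the statement is the Claim_ definition above) =====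
theorem solve_spec : Claim_equal_solve := by
  intro check _ hpre
  unfold Spec_solve
  have hne : check.toList ≠ [] := by
    intro h
    rw [String.toList_eq_nil_iff] at h
    exact hpre h
  obtain ⟨k, t, hkt⟩ := List.exists_cons_of_ne_nil hne
  have hget : PySem.Str.pyGet? check 0 = some k := by
    simp [PySem.Str.pyGet?, PySem.List.pyGet?, PySem.List.pyIdx?, hkt]
  have hsk : PySem.Set.add PySem.Set.empty k = [k] := by
    simp [PySem.Set.add, PySem.Set.empty, PySem.Set.contains]
  have hA : solve check = decide ((k :: col k t).Nodup) := by
    simp only [solve, hget, hkt, List.tail_cons, hsk]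
    rw [solveLoop_eq t [k] k (by simp)]
    simp only [List.nodup_cons, decide_eq_decide, List.mem_singleton]
    constructor
    · rintro ⟨hnd, hall⟩
      exact ⟨fun hk' => (hall k hk') rfl, hnd⟩
    · rintro ⟨hk', hnd⟩
      exact ⟨hnd, fun x hx hxk => hk' (hxk ▸ hx)⟩
  have hB : solve_alt check = decide ((k :: col k t).Nodup) := by
    simp only [solve_alt, hkt]
    rw [foldl_col0]
    simpa using beq_length_ofList (k :: col k t)
  rw [hA, hB]
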